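-- pv_equiv track=rewrite | github.com/jannes-thesis/scaling-adapter | adapter-benchmark/bench_logged-tracer/derived.py | timeseries_to_diffs_multiple
-- ===== SOURCE A (Python) =====
-- def timeseries_to_diffs_multiple(timeseries: list[tuple[int, dict[str, int]]]) -> list[tuple[int, dict[str, int]]]:
--     metrics = timeseries[0][1].keys()
--     result = [(tpl[0], {}) for tpl in timeseries]
--     for metric in metrics:
--         diffs = timeseries_to_diffs([(tpl[0], tpl[1][metric]) for tpl in timeseries])
--         for i in range(len(timeseries)):
--             result[i][1][metric] = diffs[i][1]
--     return result
--
-- def timeseries_to_diffs(time_metric_tuples: list[tuple[int, int]]) -> list[tuple[int, int]]: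
--     result = list()
--     last_val = 0
--     last_time = 0
--     for timestamp, val in time_metric_tuples:
--         duration = timestamp - last_time
--         val_diff = val - last_val
--         result.append((duration, val_diff))
--         last_val = val
--         last_time = timestamp
--     return result
-- ===== SOURCE B (Python) =====
-- def timeseries_to_diffs_multiple(timeseries: list[tuple[int, dict[str, int]]]) -> list[tuple[int, dict[str, int]]]:
--     metrics = list(timeseries[0][1].keys())
--     last = {m: 0 for m in metrics}
--     result = []
--     for timestamp, vals in timeseries:
--         result.append((timestamp, {m: vals[m] - last[m] for m in metrics}))
--         last = {m: vals[m] for m in metrics}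
--     return result
-- ===== Notes on version B (the rewrite author's own statement) =====
-- stated objective: simpler
-- what changed: A calls the helper timeseries_to_diffs once per metric and then writes each diff column back with an index loop (M+1 scans of the timeseries plus M index passes); B deletes the helper and makes one fused pass over the timeseries, carrying the previous values in a dict and emitting each row's diff dict directly.
import Mathlib
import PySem

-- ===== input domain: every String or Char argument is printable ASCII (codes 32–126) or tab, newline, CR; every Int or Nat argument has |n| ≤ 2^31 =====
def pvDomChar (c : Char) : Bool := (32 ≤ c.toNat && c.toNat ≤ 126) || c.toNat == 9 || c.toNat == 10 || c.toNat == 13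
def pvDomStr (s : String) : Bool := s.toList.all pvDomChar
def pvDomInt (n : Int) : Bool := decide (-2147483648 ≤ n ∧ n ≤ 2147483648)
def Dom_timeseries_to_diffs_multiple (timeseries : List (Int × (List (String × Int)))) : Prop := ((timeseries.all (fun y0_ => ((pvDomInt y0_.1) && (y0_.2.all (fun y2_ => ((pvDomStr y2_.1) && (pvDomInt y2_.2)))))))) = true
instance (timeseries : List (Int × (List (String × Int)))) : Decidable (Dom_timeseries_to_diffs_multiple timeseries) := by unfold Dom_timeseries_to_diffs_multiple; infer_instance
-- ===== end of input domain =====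

-- B fuses A's per-metric scans (helper timeseries_to_diffs called once per metric plus an index
-- loop writing each column) into one single pass over the timeseries keeping the previous values
-- in a dict; objective: simpler.


-- ===== PORT A =====
-- helper timeseries_to_diffs, transliterated
def timeseries_to_diffs (time_metric_tuples : List (Int × Int)) : List (Int × Int) :=
  (time_metric_tuples.foldl
    (fun (st : List (Int × Int) × Int × Int) (p : Int × Int) =>
      let duration := p.1 - st.2.2
      let val_diff := p.2 - st.2.1
      (st.1 ++ [(duration, val_diff)], p.2, p.1))
    ([], 0, 0)).1

def timeseries_to_diffs_multiple (timeseries : List (Int × (List (String × Int)))) : List (Int × (List (String × Int))) :=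
  -- metrics = timeseries[0][1].keys()  (IndexError on [] is excluded by Pre_)
  let metrics := (PySem.Dict.mk (((PySem.List.pyGet? timeseries 0).getD (0, [])).2)).keys
  -- result = [(tpl[0], {}) for tpl in timeseries]
  let result : List (Int × PySem.Dict String Int) :=
    timeseries.map (fun tpl => (tpl.1, PySem.Dict.mk []))
  let result := metrics.foldl
    (fun result metric =>
      -- diffs = timeseries_to_diffs([(tpl[0], tpl[1][metric]) for tpl in timeseries])
      -- (KeyError on a missing metric is excluded by Pre_)
      let diffs := timeseries_to_diffs
        (timeseries.map (fun tpl => (tpl.1, (PySem.Dict.mk tpl.2).getD metric 0)))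
      -- for i in range(len(timeseries)): result[i][1][metric] = diffs[i][1]
      (List.range timeseries.length).foldl
        (fun result i =>
          result.set i ((result.getD i (0, PySem.Dict.mk [])).1,
            (result.getD i (0, PySem.Dict.mk [])).2.insert metric ((diffs.getD i (0, 0)).2)))
        result)
    result
  result.map (fun r => (r.1, r.2.items))

-- ===== PORT B =====
def timeseries_to_diffs_multiple_alt (timeseries : List (Int × (List (String × Int)))) : List (Int × (List (String × Int))) :=
  -- metrics = list(timeseries[0][1].keys())
  let metrics := (PySem.Dict.mk (((PySem.List.pyGet? timeseries 0).getD (0, [])).2)).keys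
  -- last = {m: 0 for m in metrics}
  let init : PySem.Dict String Int := PySem.Dict.mk (metrics.map (fun m => (m, 0)))
  -- single pass: append (timestamp, {m: vals[m] - last[m]}), then last = {m: vals[m]}
  (timeseries.foldl
    (fun (st : List (Int × (List (String × Int))) × PySem.Dict String Int)
         (tpl : Int × (List (String × Int))) =>
      let vals := PySem.Dict.mk tpl.2
      (st.1 ++ [(tpl.1, metrics.map (fun m => (m, vals.getD m 0 - st.2.getD m 0)))],
       PySem.Dict.mk (metrics.map (fun m => (m, vals.getD m 0)))))
    ([], init)).1

-- ===== PRECONDITION & SPEC =====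
-- Pre_ excludes the empty list (IndexError) and inputs where some dict lacks a metric of the
-- first dict (KeyError); it also excludes association lists whose first dict has duplicate
-- keys, which cannot arise from a Python dict (they are not a faithful dict encoding).
def Pre_timeseries_to_diffs_multiple (timeseries : List (Int × (List (String × Int)))) : Prop :=
  timeseries ≠ [] ∧
  ((timeseries.headD (0, [])).2.map Prod.fst).Nodup ∧
  ∀ tpl ∈ timeseries, ∀ m ∈ (timeseries.headD (0, [])).2.map Prod.fst,
    (PySem.Dict.mk tpl.2).contains m = true
instance (timeseries : List (Int × (List (String × Int)))) : Decidable (Pre_timeseries_to_diffs_multiple timeseries) := by unfold Pre_timeseries_to_diffs_multiple; infer_instance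

def pvWitness_timeseries_to_diffs_multiple : (List (Int × (List (String × Int)))) :=
  [(1, [("a", 3), ("b", 10)]), (4, [("a", 5), ("b", 7)])]

def Spec_timeseries_to_diffs_multiple (timeseries : List (Int × (List (String × Int)))) (out : List (Int × (List (String × Int)))) : Prop := out = timeseries_to_diffs_multiple_alt timeseries
instance (timeseries : List (Int × (List (String × Int)))) (out : List (Int × (List (String × Int)))) : Decidable (Spec_timeseries_to_diffs_multiple timeseries out) := by unfold Spec_timeseries_to_diffs_multiple; infer_instance

-- ===== CLAIM (what is proved, stated in full; the proofs are below) =====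
def Claim_equal_timeseries_to_diffs_multiple : Prop := ∀ (timeseries : List (Int × (List (String × Int)))), Dom_timeseries_to_diffs_multiple timeseries → Pre_timeseries_to_diffs_multiple timeseries → Spec_timeseries_to_diffs_multiple timeseries (timeseries_to_diffs_multiple timeseries)

-- ===== LEMMAS AND PROOFS =====

-- value of metric m in tuple tpl (0 outside Pre_, where it is irrelevant)
def pvVal (tpl : Int × (List (String × Int))) (m : String) : Int :=
  (PySem.Dict.mk tpl.2).getD m 0

-- the common specification: one row per tuple, diffs against the previous tuple
def pvSpec (metrics : List String) :
    (Int × (List (String × Int))) → List (Int × (List (String × Int))) → List (Int × (List (String × Int)))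
  | _, [] => []
  | prev, t :: rest =>
      (t.1, metrics.map (fun m => (m, pvVal t m - pvVal prev m))) :: pvSpec metrics t rest

-- the diff column of one metric
def pvCol (m : String) :
    (Int × (List (String × Int))) → List (Int × (List (String × Int))) → List (Int × Int)
  | _, [] => []
  | prev, t :: rest => (t.1 - prev.1, pvVal t m - pvVal prev m) :: pvCol m t rest

theorem pvSpec_length (metrics : List String) (prev : Int × (List (String × Int)))
    (ts : List (Int × (List (String × Int)))) : (pvSpec metrics prev ts).length = ts.length := by
  induction ts generalizing prev with
  | nil => rfl
  | cons t rest ih => simp [pvSpec, ih]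

theorem pvCol_length (m : String) (prev : Int × (List (String × Int)))
    (ts : List (Int × (List (String × Int)))) : (pvCol m prev ts).length = ts.length := by
  induction ts generalizing prev with
  | nil => rfl
  | cons t rest ih => simp [pvCol, ih]

theorem getD_mk_map_self (l : List String) (f : String → Int) (m : String) (h : m ∈ l) :
    (PySem.Dict.mk (l.map (fun x => (x, f x)))).getD m 0 = f m := by
  induction l with
  | nil => cases h
  | cons a l ih =>
      by_cases hm : a = m
      · subst hm
        simp [PySem.Dict.getD_eq_get?_getD, PySem.Dict.get?_mk_cons]
      · have h' : m ∈ l := by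
          rcases List.mem_cons.mp h with h1 | h1
          · exact absurd h1.symm hm
          · exact h1
        simpa [PySem.Dict.getD_eq_get?_getD, PySem.Dict.get?_mk_cons, hm]
          using ih h'

-- B's loop equals pvSpec
theorem alt_loop_eq (metrics : List String) (ts : List (Int × (List (String × Int)))) :
    ∀ (acc : List (Int × (List (String × Int)))) (last : PySem.Dict String Int)
      (prev : Int × (List (String × Int))),
      (∀ m ∈ metrics, last.getD m 0 = pvVal prev m) →
      (ts.foldl
        (fun (st : List (Int × (List (String × Int))) × PySem.Dict String Int)
             (tpl : Int × (List (String × Int))) =>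
          (st.1 ++ [(tpl.1, metrics.map (fun m => (m, (PySem.Dict.mk tpl.2).getD m 0 - st.2.getD m 0)))],
           PySem.Dict.mk (metrics.map (fun m => (m, (PySem.Dict.mk tpl.2).getD m 0)))))
        (acc, last)).1 = acc ++ pvSpec metrics prev ts := by
  induction ts with
  | nil => intro acc last prev _; simp [pvSpec]
  | cons t rest ih =>
      intro acc last prev hlast
      have hrow : metrics.map (fun m => (m, (PySem.Dict.mk t.2).getD m 0 - last.getD m 0))
          = metrics.map (fun m => (m, pvVal t m - pvVal prev m)) := by
        apply List.map_congr_left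
        intro m hm
        simp [pvVal, hlast m hm]
      have hnew : ∀ m ∈ metrics,
          (PySem.Dict.mk (metrics.map (fun m => (m, (PySem.Dict.mk t.2).getD m 0)))).getD m 0
            = pvVal t m := by
        intro m hm
        simpa [pvVal] using getD_mk_map_self metrics (fun x => (PySem.Dict.mk t.2).getD x 0) m hm
      simp only [List.foldl_cons, pvSpec]
      rw [ih (acc ++ [(t.1, metrics.map (fun m => (m, (PySem.Dict.mk t.2).getD m 0 - last.getD m 0)))]) _ t hnew]
      simp [hrow]

-- A's helper loop equals pvCol on a mapped list
theorem tsd_loop (ts : List (Int × (List (String × Int)))) (m : String) :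
    ∀ (acc : List (Int × Int)) (prev : Int × (List (String × Int))),
      ((ts.map (fun tpl => (tpl.1, (PySem.Dict.mk tpl.2).getD m 0))).foldl
        (fun (st : List (Int × Int) × Int × Int) (p : Int × Int) =>
          (st.1 ++ [(p.1 - st.2.2, p.2 - st.2.1)], p.2, p.1))
        (acc, pvVal prev m, prev.1)).1 = acc ++ pvCol m prev ts := by
  induction ts with
  | nil => intro acc prev; simp [pvCol]
  | cons t rest ih =>
      intro acc prev
      simp only [List.map_cons, List.foldl_cons, pvCol]
      have := ih (acc ++ [(t.1 - prev.1, (PySem.Dict.mk t.2).getD m 0 - pvVal prev m)]) t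
      simp only [pvVal] at this ⊢
      rw [this]
      simp

theorem tsd_eq_pvCol (ts : List (Int × (List (String × Int)))) (m : String) :
    timeseries_to_diffs (ts.map (fun tpl => (tpl.1, (PySem.Dict.mk tpl.2).getD m 0)))
      = pvCol m (0, []) ts := by
  have := tsd_loop ts m [] (0, [])
  simpa [timeseries_to_diffs, pvVal] using this

-- writing/reading at the boundary of an append
theorem set_append_of_length {α : Type} (xs ys : List α) (y v : α) (i : Nat)
    (h : i = xs.length) : (xs ++ y :: ys).set i v = xs ++ v :: ys := by
  subst h
  induction xs with
  | nil => rfl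
  | cons a xs ih => simp [ih]

theorem getD_append_of_length {α : Type} (xs ys : List α) (y d : α) (i : Nat)
    (h : i = xs.length) : (xs ++ y :: ys).getD i d = y := by
  subst h
  rw [List.getD_eq_getElem _ _ (by simp)]
  rw [List.getElem_append_right (le_refl _)]
  simp

-- the index-writing loop over range n is a pointwise update
theorem range_set_fold {α : Type} (f : Nat → α → α) (d : α) :
    ∀ (n : Nat) (l : List α), n ≤ l.length →
    ((List.range n).foldl (fun r i => r.set i (f i (r.getD i d))) l)
      = (l.take n).mapIdx f ++ l.drop n := by
  intro n
  induction n with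
  | zero => intro l _; simp
  | succ n ih =>
      intro l hn
      have hn' : n < l.length := hn
      rw [List.range_succ, List.foldl_append, ih l (Nat.le_of_succ_le hn)]
      simp only [List.foldl_cons, List.foldl_nil]
      have hlen : ((l.take n).mapIdx f).length = n := by
        simp [Nat.min_eq_left (Nat.le_of_succ_le hn)]
      rw [List.drop_eq_getElem_cons hn']
      rw [getD_append_of_length _ _ _ _ _ hlen.symm]
      rw [set_append_of_length _ _ _ _ _ hlen.symm]
      rw [List.take_succ_eq_append_getElem hn', List.mapIdx_concat]
      simp [Nat.min_eq_left (Nat.le_of_succ_le hn)]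

theorem mapIdx_getD_eq_zip {α β γ : Type} (L : List α) (D : List β) (d : β)
    (h : D.length = L.length) (g : α → β → γ) :
    L.mapIdx (fun i x => g x (D.getD i d)) = (L.zip D).map (fun p => g p.1 p.2) := by
  apply List.ext_getElem
  · simp [h]
  · intro i h1 h2
    simp only [List.getElem_mapIdx, List.getElem_map, List.getElem_zip]
    rw [List.getD_eq_getElem _ _ (by simp at h1 ⊢; omega)]

-- appending one metric's column to every row
theorem combine_col (done : List String) (m : String)
    (prev : Int × (List (String × Int))) (ts : List (Int × (List (String × Int)))) :
    ((pvSpec done prev ts).zip (pvCol m prev ts)).map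
      (fun p => (p.1.1, p.1.2 ++ [(m, p.2.2)]))
      = pvSpec (done ++ [m]) prev ts := by
  induction ts generalizing prev with
  | nil => rfl
  | cons t rest ih => simp [pvSpec, pvCol, ih]

def pvMkRow (r : Int × (List (String × Int))) : Int × PySem.Dict String Int :=
  (r.1, PySem.Dict.mk r.2)

theorem insert_mk_fresh (l : List (String × Int)) (m : String) (v : Int)
    (h : m ∉ l.map Prod.fst) :
    (PySem.Dict.mk l).insert m v = PySem.Dict.mk (l ++ [(m, v)]) := by
  apply PySem.Dict.ext
  rw [PySem.Dict.items_insert_of_not_contains]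
  simp only [PySem.Dict.contains_mk]
  rw [List.any_eq_false]
  intro p hp
  simp only [beq_iff_eq]
  intro hpm
  exact h (hpm ▸ List.mem_map_of_mem hp)

-- every row of pvSpec is keyed exactly by the metric list
theorem pvSpec_row (done : List String) (prev : Int × (List (String × Int)))
    (ts : List (Int × (List (String × Int)))) :
    ∀ r ∈ pvSpec done prev ts, ∃ g : String → Int, r.2 = done.map (fun x => (x, g x)) := by
  induction ts generalizing prev with
  | nil => intro r hr; cases hr
  | cons t rest ih =>
      intro r hr
      rcases List.mem_cons.mp hr with h | h
      · exact ⟨fun m => pvVal t m - pvVal prev m, by rw [h]⟩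
      · exact ih t r h

-- one metric step of A, at spec level
theorem metric_step (ts : List (Int × (List (String × Int)))) (done : List String) (m : String)
    (hm : m ∉ done) :
    (List.range ts.length).foldl
      (fun result i =>
        result.set i ((result.getD i (0, PySem.Dict.mk [])).1,
          (result.getD i (0, PySem.Dict.mk [])).2.insert m
            (((pvCol m (0, []) ts).getD i (0, 0)).2)))
      ((pvSpec done (0, []) ts).map pvMkRow)
      = (pvSpec (done ++ [m]) (0, []) ts).map pvMkRow := by
  have hlen : ((pvSpec done (0, []) ts).map pvMkRow).length = ts.length := by
    simp [pvSpec_length]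
  have h1 := range_set_fold
    (fun i (x : Int × PySem.Dict String Int) =>
      (x.1, x.2.insert m (((pvCol m (0, []) ts).getD i (0, 0)).2)))
    (0, PySem.Dict.mk []) ts.length ((pvSpec done (0, []) ts).map pvMkRow) (le_of_eq hlen.symm)
  rw [h1]
  rw [List.take_of_length_le (le_of_eq hlen), List.drop_of_length_le (le_of_eq hlen),
    List.append_nil]
  rw [mapIdx_getD_eq_zip ((pvSpec done (0, []) ts).map pvMkRow) (pvCol m (0, []) ts) (0, 0)
    (by simp [pvCol_length, pvSpec_length])
    (fun x c => (x.1, x.2.insert m c.2))]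
  rw [List.zip_map_left, List.map_map]
  rw [← combine_col done m (0, []) ts, List.map_map]
  apply List.map_congr_left
  intro p hp
  obtain ⟨g, hg⟩ := pvSpec_row done (0, []) ts p.1 (List.of_mem_zip hp).1
  have hfresh : m ∉ (p.1.2).map Prod.fst := by
    rw [hg]
    simpa using hm
  simp [pvMkRow, Prod.map, insert_mk_fresh _ _ _ hfresh]

theorem pvSpec_nil_metrics (prev : Int × (List (String × Int)))
    (ts : List (Int × (List (String × Int)))) :
    pvSpec [] prev ts = ts.map (fun t => (t.1, [])) := by
  induction ts generalizing prev with
  | nil => rfl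
  | cons t rest ih => simp [pvSpec, ih]

-- A's fold over the metric list, at spec level
theorem metric_fold (ts : List (Int × (List (String × Int)))) :
    ∀ (rest done : List String), (done ++ rest).Nodup →
    rest.foldl
      (fun result metric =>
        (List.range ts.length).foldl
          (fun result i =>
            result.set i ((result.getD i (0, PySem.Dict.mk [])).1,
              (result.getD i (0, PySem.Dict.mk [])).2.insert metric
                ((timeseries_to_diffs
                    (ts.map (fun tpl => (tpl.1, (PySem.Dict.mk tpl.2).getD metric 0)))).getD i (0, 0)).2))
          result)
      ((pvSpec done (0, []) ts).map pvMkRow)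
      = (pvSpec (done ++ rest) (0, []) ts).map pvMkRow := by
  intro rest
  induction rest with
  | nil => intro done _; simp
  | cons m rest ih =>
      intro done hnd
      have hm : m ∉ done := by
        intro h
        exact List.disjoint_of_nodup_append hnd h (by simp)
      simp only [List.foldl_cons]
      rw [tsd_eq_pvCol ts m, metric_step ts done m hm]
      have := ih (done ++ [m]) (by simpa using hnd)
      rw [this]
      simp

theorem pvVal_base (m : String) : pvVal (0, []) m = 0 := by
  simp [pvVal, PySem.Dict.getD, PySem.Dict.get?]

-- A equals the common specification
theorem A_eq_spec (h0 : Int × (List (String × Int))) (t0 : List (Int × (List (String × Int))))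
    (hnd : (h0.2.map Prod.fst).Nodup) :
    timeseries_to_diffs_multiple (h0 :: t0)
      = pvSpec (h0.2.map Prod.fst) (0, []) (h0 :: t0) := by
  simp only [timeseries_to_diffs_multiple, PySem.List.pyGet?_zero_cons, Option.getD_some]
  have hk : (PySem.Dict.mk h0.2).keys = h0.2.map Prod.fst := by simp [PySem.Dict.keys]
  rw [hk]
  rw [show ((h0 :: t0).map (fun tpl => (tpl.1, PySem.Dict.mk ([] : List (String × Int)))))
      = (pvSpec [] (0, []) (h0 :: t0)).map pvMkRow from by
    simp [pvSpec_nil_metrics, List.map_map, pvMkRow, Function.comp]]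
  rw [metric_fold (h0 :: t0) (h0.2.map Prod.fst) [] (by simpa using hnd)]
  rw [List.map_map]
  have hcomp : ((fun r : Int × PySem.Dict String Int => (r.1, r.2.items)) ∘ pvMkRow)
      = fun r : Int × (List (String × Int)) => r := by
    funext r; rfl
  rw [hcomp, List.map_id']
  simp

-- B equals the common specification
theorem B_eq_spec (h0 : Int × (List (String × Int))) (t0 : List (Int × (List (String × Int)))) :
    timeseries_to_diffs_multiple_alt (h0 :: t0)
      = pvSpec (h0.2.map Prod.fst) (0, []) (h0 :: t0) := by
  simp only [timeseries_to_diffs_multiple_alt, PySem.List.pyGet?_zero_cons, Option.getD_some]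
  have hk : (PySem.Dict.mk h0.2).keys = h0.2.map Prod.fst := by simp [PySem.Dict.keys]
  rw [hk]
  have hinit : ∀ m ∈ h0.2.map Prod.fst,
      (PySem.Dict.mk ((h0.2.map Prod.fst).map (fun m => (m, (0 : Int))))).getD m 0
        = pvVal (0, []) m := by
    intro m hm
    rw [getD_mk_map_self _ _ _ hm, pvVal_base]
  rw [alt_loop_eq (h0.2.map Prod.fst) (h0 :: t0) [] _ (0, []) hinit]
  simp

theorem timeseries_to_diffs_multiple_spec : Claim_equal_timeseries_to_diffs_multiple := by
  intro ts _ hpre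
  unfold Spec_timeseries_to_diffs_multiple
  obtain ⟨hne, hnd, -⟩ := hpre
  obtain ⟨h0, t0, rfl⟩ := List.exists_cons_of_ne_nil hne
  simp only [List.headD_cons] at hnd
  rw [A_eq_spec h0 t0 hnd, B_eq_spec h0 t0]
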